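-- pv_equiv track=rewrite | github.com/zihuyishi/leetcode | t748/main.py | checkComplete
-- ===== SOURCE A (Python) =====
-- def checkComplete(src, dest):
--     keys = dest.keys()
--     for key in keys:
--         if key in src:
--             if src[key] < dest[key]:
--                 return False
--         else:
--             return False
--     return True
-- ===== SOURCE B (Python) =====
-- def checkComplete(src, dest):
--     s = sorted(src.items(), key=lambda p: p[0])
--     d = sorted(dest.items(), key=lambda p: p[0])
--     i = 0
--     for k, dv in d:
--         while i < len(s) and s[i][0] < k:
--             i += 1
--         if i == len(s) or s[i][0] != k:
--             return False
--         if s[i][1] < dv: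
--             return False
--         i += 1
--     return True
-- ===== Notes on version B (the rewrite author's own statement) =====
-- stated objective: alternative
-- what changed: Replaced the per-key dict-lookup loop by a different algorithm: sort both item lists by key and verify coverage with a single two-pointer merge scan, so no hash lookups occur at all.
import Mathlib
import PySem

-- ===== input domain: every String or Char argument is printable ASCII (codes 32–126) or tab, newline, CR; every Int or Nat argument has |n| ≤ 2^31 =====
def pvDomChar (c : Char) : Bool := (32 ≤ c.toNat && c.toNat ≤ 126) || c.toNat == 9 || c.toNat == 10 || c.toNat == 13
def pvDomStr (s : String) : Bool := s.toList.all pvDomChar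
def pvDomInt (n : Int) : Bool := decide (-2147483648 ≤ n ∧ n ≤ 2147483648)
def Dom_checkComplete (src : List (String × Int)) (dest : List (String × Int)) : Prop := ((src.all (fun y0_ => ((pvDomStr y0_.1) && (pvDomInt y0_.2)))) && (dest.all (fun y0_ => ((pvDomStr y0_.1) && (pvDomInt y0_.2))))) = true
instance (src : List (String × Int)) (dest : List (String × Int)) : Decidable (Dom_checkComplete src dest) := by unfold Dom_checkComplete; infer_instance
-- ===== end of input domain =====

-- B replaces A's dict-lookup loop by a different algorithm: sort both item lists by key and
-- run a two-pointer merge scan; same return value (not claimed faster).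


-- ===== PORT A =====
-- A: one fused loop over dest's keys, returning False early on a missing key or a smaller value.
def checkCompleteLoop (src dest : PySem.Dict String Int) : List String → Bool
  | [] => true
  | k :: ks =>
    match src.get? k with
    | some sv =>
      match dest.get? k with
      | some dv => if sv < dv then false else checkCompleteLoop src dest ks
      | none => checkCompleteLoop src dest ks   -- unreachable: k comes from dest.keys
    | none => false

def checkComplete (src : List (String × Int)) (dest : List (String × Int)) : Bool :=
  checkCompleteLoop (PySem.Dict.mk src) (PySem.Dict.mk dest) (PySem.Dict.keys (PySem.Dict.mk dest))

-- ===== PORT B =====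
-- B: sort both item lists by key, then one two-pointer merge scan (the advancing pointer 'i'
-- of Source B is the entries dropped from the first list).
def mergeCheck : List (String × Int) → List (String × Int) → Bool
  | _, [] => true
  | [], _ :: _ => false
  | (sk, sv) :: ss, (dk, dv) :: ds =>
    if sk < dk then mergeCheck ss ((dk, dv) :: ds)
    else if sk = dk then (if sv < dv then false else mergeCheck ss ds)
    else false
termination_by s d => s.length + d.length

def checkComplete_alt (src : List (String × Int)) (dest : List (String × Int)) : Bool :=
  mergeCheck
    (PySem.List.sorted (PySem.Dict.mk src).items (fun p => p.1) false)
    (PySem.List.sorted (PySem.Dict.mk dest).items (fun p => p.1) false)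

-- ===== PRECONDITION & SPEC =====
-- Pre_ excludes association lists with duplicate keys: such lists do not represent any Python
-- dict argument (both parameters are dicts in Python, whose keys are necessarily distinct).
def Pre_checkComplete (src : List (String × Int)) (dest : List (String × Int)) : Prop :=
  (src.map Prod.fst).Nodup ∧ (dest.map Prod.fst).Nodup
instance (src : List (String × Int)) (dest : List (String × Int)) : Decidable (Pre_checkComplete src dest) := by unfold Pre_checkComplete; infer_instance
def pvWitness_checkComplete : (List (String × Int)) × (List (String × Int)) := ([("a", 3), ("b", 1)], [("a", 2)])

def Spec_checkComplete (src : List (String × Int)) (dest : List (String × Int)) (out : Bool) : Prop := out = checkComplete_alt src dest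
instance (src : List (String × Int)) (dest : List (String × Int)) (out : Bool) : Decidable (Spec_checkComplete src dest out) := by unfold Spec_checkComplete; infer_instance

-- ===== CLAIM (what is proved, stated in full; the proofs are below) =====
def Claim_equal_checkComplete : Prop := ∀ (src : List (String × Int)) (dest : List (String × Int)), Dom_checkComplete src dest → Pre_checkComplete src dest → Spec_checkComplete src dest (checkComplete src dest)

-- ===== LEMMAS AND PROOFS =====

-- first-match lookup on a raw association list (proof-side bridge between the two ports)
def pvLookup (l : List (String × Int)) (k : String) : Option (String × Int) :=
  l.find? (fun q => q.1 == k)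

-- the common normal form both ports are reduced to
def pvCanon (src dest : List (String × Int)) : Bool :=
  dest.all (fun p => match pvLookup src p.1 with
    | some q => !decide (q.2 < p.2)
    | none => false)

lemma pvAll_congr {α : Type} (l : List α) (f g : α → Bool) (h : ∀ x ∈ l, f x = g x) :
    l.all f = l.all g := by
  induction l with
  | nil => rfl
  | cons a t ih =>
    simp only [List.all_cons, h a List.mem_cons_self,
      ih (fun x hx => h x (List.mem_cons_of_mem _ hx))]

lemma get?_mk_eq_pvLookup (l : List (String × Int)) (k : String) :
    (PySem.Dict.mk l).get? k = (pvLookup l k).map Prod.snd := by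
  induction l with
  | nil => simp [pvLookup, PySem.Dict.get?]
  | cons p t ih =>
    obtain ⟨a, b⟩ := p
    by_cases h : a = k
    · rw [pvLookup, List.find?_cons_of_pos (by simpa using h)]
      simp [PySem.Dict.get?_mk_cons, h]
    · rw [pvLookup, List.find?_cons_of_neg (by simpa using h)]
      rw [PySem.Dict.get?_mk_cons]
      simpa [h] using ih

lemma find?_eq_some_of_unique {α : Type} (l : List α) (x : α)
    (p : α → Bool) (hx : x ∈ l) (hpx : p x = true)
    (huniq : ∀ y ∈ l, p y = true → y = x) :
    l.find? p = some x := by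
  induction l with
  | nil => cases hx
  | cons a t ih =>
    by_cases hpa : p a = true
    · rw [List.find?_cons_of_pos hpa, huniq a List.mem_cons_self hpa]
    · have hxt : x ∈ t := by
        rcases List.mem_cons.mp hx with h | h
        · exact absurd (h ▸ hpx) hpa
        · exact h
      rw [List.find?_cons_of_neg hpa]
      exact ih hxt (fun y hy => huniq y (List.mem_cons_of_mem _ hy))

lemma pvLookup_perm (l l' : List (String × Int)) (h : l'.Perm l)
    (hnd : (l.map Prod.fst).Nodup) (k : String) :
    pvLookup l' k = pvLookup l k := by
  unfold pvLookup
  cases hl : l.find? (fun q => q.1 == k) with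
  | none =>
    have hno := List.find?_eq_none.mp hl
    exact List.find?_eq_none.mpr (fun x hx => hno x (h.mem_iff.mp hx))
  | some x =>
    have hxl : x ∈ l := List.mem_of_find?_eq_some hl
    have hpx := List.find?_some hl
    refine find?_eq_some_of_unique l' x _ (h.mem_iff.mpr hxl) hpx ?_
    intro y hy hpy
    exact List.inj_on_of_nodup_map hnd (h.mem_iff.mp hy) hxl
      (by rw [eq_of_beq hpy, eq_of_beq hpx])

lemma pairwise_lt_of_le_nodup (l : List (String × Int))
    (h1 : l.Pairwise (fun a b => a.1 ≤ b.1)) (h2 : (l.map Prod.fst).Nodup) :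
    l.Pairwise (fun a b => a.1 < b.1) := by
  induction l with
  | nil => exact List.Pairwise.nil
  | cons a t ih =>
    rw [List.map_cons, List.nodup_cons] at h2
    rw [List.pairwise_cons] at h1 ⊢
    refine ⟨fun b hb => lt_of_le_of_ne (h1.1 b hb) ?_, ih h1.2 h2.2⟩
    intro he
    exact h2.1 (he ▸ List.mem_map_of_mem hb)

-- dropping a head entry whose key is below every key of dest does not change the normal form
lemma pvCanon_cons_lt (q : String × Int) (s d : List (String × Int))
    (h : ∀ p ∈ d, q.1 < p.1) : pvCanon (q :: s) d = pvCanon s d := by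
  refine pvAll_congr d _ _ (fun p hp => ?_)
  have hstep : pvLookup (q :: s) p.1 = pvLookup s p.1 := by
    unfold pvLookup
    exact List.find?_cons_of_neg (by simp only [beq_iff_eq]; exact ne_of_lt (h p hp))
  rw [hstep]

lemma mergeCheck_eq : ∀ s d : List (String × Int),
    s.Pairwise (fun a b => a.1 < b.1) → d.Pairwise (fun a b => a.1 < b.1) →
    mergeCheck s d = pvCanon s d := by
  intro s d
  induction s, d using mergeCheck.induct with
  | case1 s => intro _ _; simp [mergeCheck, pvCanon]
  | case2 p ds => intro _ _; simp [mergeCheck, pvCanon, pvLookup]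
  | case3 sk sv ss dk dv ds hlt ih =>
    intro hs hd
    rw [mergeCheck]
    simp only [hlt, if_pos]
    rw [ih (List.pairwise_cons.mp hs).2 hd]
    refine (pvCanon_cons_lt (sk, sv) ss ((dk, dv) :: ds) ?_).symm
    intro p hp
    rcases List.mem_cons.mp hp with h | h
    · simpa [h] using hlt
    · exact lt_trans hlt ((List.pairwise_cons.mp hd).1 p h)
  | case4 sv ss dk dv ds hv hnl =>
    intro hs hd
    have hhead : pvLookup ((dk, sv) :: ss) dk = some (dk, sv) := by
      unfold pvLookup
      exact List.find?_cons_of_pos (by simp)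
    simp [mergeCheck, pvCanon, List.all_cons, hhead, hv]
  | case5 sv ss dk dv ds hv hnl ih =>
    intro hs hd
    have hhead : pvLookup ((dk, sv) :: ss) dk = some (dk, sv) := by
      unfold pvLookup
      exact List.find?_cons_of_pos (by simp)
    have htail : ∀ p ∈ ds, dk < p.1 := fun p hp => (List.pairwise_cons.mp hd).1 p hp
    have hstep : mergeCheck ((dk, sv) :: ss) ((dk, dv) :: ds) = mergeCheck ss ds := by
      simp [mergeCheck, hv]
    rw [hstep, ih (List.pairwise_cons.mp hs).2 (List.pairwise_cons.mp hd).2,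
      ← pvCanon_cons_lt (dk, sv) ss ds htail]
    simp [pvCanon, List.all_cons, hhead, hv]
  | case6 sk sv ss dk dv ds hlt hne =>
    intro hs hd
    have hgt : dk < sk := by
      rcases lt_trichotomy sk dk with h | h | h
      · exact absurd h hlt
      · exact absurd h hne
      · exact h
    have hnone : pvLookup ((sk, sv) :: ss) dk = none := by
      unfold pvLookup
      refine List.find?_eq_none.mpr (fun q hq => ?_)
      rcases List.mem_cons.mp hq with h | h
      · simp only [h, beq_iff_eq]; exact ne_of_gt hgt
      · have : sk < q.1 := (List.pairwise_cons.mp hs).1 q h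
        simp only [beq_iff_eq]; exact ne_of_gt (lt_trans hgt this)
    rw [mergeCheck]
    simp [hlt, hne, pvCanon, List.all_cons, hnone]

lemma loop_eq_all (S D : PySem.Dict String Int) (ks : List String) :
    checkCompleteLoop S D ks = ks.all (fun k =>
      match S.get? k with
      | some sv =>
        match D.get? k with
        | some dv => !decide (sv < dv)
        | none => true
      | none => false) := by
  induction ks with
  | nil => rfl
  | cons k ks ih =>
    rw [checkCompleteLoop, List.all_cons]
    cases hs : S.get? k with
    | none => simp
    | some sv =>
      cases hd : D.get? k with
      | none => simpa using ih
      | some dv =>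
        by_cases hv : sv < dv
        · simp [hv]
        · simpa [hv] using ih

-- ===== VERDICT (by name: the statement is the Claim_ definition above) =====
theorem checkComplete_spec : Claim_equal_checkComplete := by
  intro src dest _ hpre
  obtain ⟨hns, hnd⟩ := hpre
  unfold Spec_checkComplete
  have hitems_s : (PySem.Dict.mk src).items = src := rfl
  have hitems_d : (PySem.Dict.mk dest).items = dest := rfl
  have hkeys_d : (PySem.Dict.mk dest).keys = dest.map Prod.fst := rfl
  -- A-side: reduce the fused loop to the normal form
  have hA : checkComplete src dest = pvCanon src dest := by
    rw [checkComplete, loop_eq_all, hkeys_d, List.all_map, pvCanon]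
    refine pvAll_congr dest _ _ (fun p hp => ?_)
    have hDp : (PySem.Dict.mk dest).get? p.1 = some p.2 :=
      PySem.Dict.get?_of_mem_items _ (by rw [hitems_d]; exact hp) (by rw [hkeys_d]; exact hnd)
    have hSp := get?_mk_eq_pvLookup src p.1
    cases hlk : pvLookup src p.1 with
    | none => simp [Function.comp, hSp, hlk]
    | some q => simp [Function.comp, hSp, hlk, hDp]
  -- B-side: reduce the sorted merge scan to the same normal form
  have hB : checkComplete_alt src dest = pvCanon src dest := by
    rw [checkComplete_alt, hitems_s, hitems_d]
    set s' := PySem.List.sorted src (fun p => p.1) false with hs'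
    set d' := PySem.List.sorted dest (fun p => p.1) false with hd'
    have hps : s'.Perm src := PySem.List.sorted_perm _ _ _
    have hpd : d'.Perm dest := PySem.List.sorted_perm _ _ _
    have hnds : (s'.map Prod.fst).Nodup := ((hps.map Prod.fst).nodup_iff).mpr hns
    have hndd : (d'.map Prod.fst).Nodup := ((hpd.map Prod.fst).nodup_iff).mpr hnd
    rw [mergeCheck_eq s' d'
      (pairwise_lt_of_le_nodup s' (PySem.List.sorted_pairwise _ _) hnds)
      (pairwise_lt_of_le_nodup d' (PySem.List.sorted_pairwise _ _) hndd)]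
    have hfun : (fun p : String × Int => (match pvLookup s' p.1 with
        | some q => !decide (q.2 < p.2)
        | none => false)) = (fun p : String × Int => (match pvLookup src p.1 with
        | some q => !decide (q.2 < p.2)
        | none => false)) := by
      funext p; rw [pvLookup_perm src s' hps hns p.1]
    rw [pvCanon, hfun, ← pvCanon]
    exact hpd.all_eq
  rw [hA, hB]
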